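-- pv_equiv track=rewrite | github.com/MrLeeRichards/YOM-Computer-Science-Camp | FractalTurtle.py | fractalTurns
-- ===== SOURCE A (Python) =====
-- def fractalTurns(pattern, iterations, turnList = []):
--    if iterations <= 1:
--       return turnList
--    else:
--       newTurnList = [] + turnList
--       for turn in pattern:
--          newTurnList += [turn] + turnList
--       return fractalTurns(pattern, iterations - 1, newTurnList)
-- ===== SOURCE B (Python) =====
-- def fractalTurns(pattern, iterations, turnList = []):
--    result = turnList
--    while iterations > 1:
--       newList = list(result)
--       for turn in pattern:
--          newList.append(turn)
--          newList.extend(result)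
--       result = newList
--       iterations -= 1
--    return result
-- ===== Notes on version B (the rewrite author's own statement) =====
-- stated objective: idiomatic
-- what changed: Replaced the tail recursion (which rebuilds the next list with repeated list concatenations of [turn] + turnList) by an iterative while-loop that grows one list in place with append/extend.
import Mathlib
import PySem

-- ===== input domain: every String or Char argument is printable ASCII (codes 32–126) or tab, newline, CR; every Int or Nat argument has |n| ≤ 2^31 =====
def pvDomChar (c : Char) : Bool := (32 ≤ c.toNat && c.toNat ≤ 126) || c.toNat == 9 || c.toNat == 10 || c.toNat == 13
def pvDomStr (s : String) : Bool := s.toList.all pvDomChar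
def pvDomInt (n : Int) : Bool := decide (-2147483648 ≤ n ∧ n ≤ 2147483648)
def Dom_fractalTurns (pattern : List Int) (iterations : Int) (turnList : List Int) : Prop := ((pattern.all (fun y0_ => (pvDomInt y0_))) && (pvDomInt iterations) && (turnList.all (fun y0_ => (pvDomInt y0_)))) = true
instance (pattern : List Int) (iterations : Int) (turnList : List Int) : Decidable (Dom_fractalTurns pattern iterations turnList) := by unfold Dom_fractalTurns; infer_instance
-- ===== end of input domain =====

-- B replaces A's tail recursion by an iterative while-loop growing one list with append/extend (return value only; neither mutates its arguments).
-- ===== PORT A =====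
def fractalTurns (pattern : List Int) (iterations : Int) (turnList : List Int) : List Int :=
  if iterations ≤ 1 then turnList
  else
    let newTurnList := pattern.foldl (fun acc turn => acc ++ ([turn] ++ turnList)) ([] ++ turnList)
    fractalTurns pattern (iterations - 1) newTurnList
termination_by iterations.toNat
decreasing_by omega

-- ===== PORT B =====
-- the while-loop of Source B: fuel = number of remaining iterations with `iterations > 1`
def fractalTurnsLoop (pattern : List Int) (result : List Int) : Nat → List Int
  | 0 => result
  | n + 1 =>
    fractalTurnsLoop pattern
      (pattern.foldl (fun newList turn => (newList ++ [turn]) ++ result) result) n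

def fractalTurns_alt (pattern : List Int) (iterations : Int) (turnList : List Int) : List Int :=
  fractalTurnsLoop pattern turnList (iterations - 1).toNat

-- ===== PRECONDITION & SPEC =====
def Spec_fractalTurns (pattern : List Int) (iterations : Int) (turnList : List Int) (out : List Int) : Prop := out = fractalTurns_alt pattern iterations turnList
instance (pattern : List Int) (iterations : Int) (turnList : List Int) (out : List Int) : Decidable (Spec_fractalTurns pattern iterations turnList out) := by unfold Spec_fractalTurns; infer_instance

-- ===== CLAIM (what is proved, stated in full; the proofs are below) =====
def Claim_equal_fractalTurns : Prop := ∀ (pattern : List Int) (iterations : Int) (turnList : List Int), Dom_fractalTurns pattern iterations turnList → Spec_fractalTurns pattern iterations turnList (fractalTurns pattern iterations turnList)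

-- ===== LEMMAS AND PROOFS =====

-- ===== VERDICT (by name: the statement is the Claim_ definition above) =====
theorem fractalTurns_eq_loop : ∀ (n : Nat) (pattern : List Int) (iterations : Int) (turnList : List Int),
    (iterations - 1).toNat = n →
    fractalTurns pattern iterations turnList = fractalTurnsLoop pattern turnList n := by
  intro n
  induction n with
  | zero =>
    intro pattern iterations turnList h
    rw [fractalTurns]
    have : iterations ≤ 1 := by omega
    simp [this, fractalTurnsLoop]
  | succ n ih =>
    intro pattern iterations turnList h
    rw [fractalTurns]
    have hgt : ¬ iterations ≤ 1 := by omega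
    simp only [hgt, if_false, fractalTurnsLoop]
    have harg : pattern.foldl (fun acc turn => acc ++ ([turn] ++ turnList)) ([] ++ turnList)
        = pattern.foldl (fun newList turn => (newList ++ [turn]) ++ turnList) turnList := by
      simp [List.append_assoc]
    rw [harg]
    exact ih pattern (iterations - 1) _ (by omega)

theorem fractalTurns_spec : Claim_equal_fractalTurns := by
  intro pattern iterations turnList _
  unfold Spec_fractalTurns fractalTurns_alt
  exact fractalTurns_eq_loop _ pattern iterations turnList rfl
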